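-- pv_equiv track=rewrite | github.com/cseduashraful/rfm | code/inference_history.py | _select_recent_min_overlap_indices
-- ===== SOURCE A (Python) =====
-- def _select_recent_min_overlap_indices(
--     timestamp_values: list[int],
--     k: int,
--     min_gap_ns: int,
-- ) -> list[int]:
--     if k <= 0 or not timestamp_values:
--         return []
--
--     selected: list[int] = []
--     for idx in range(len(timestamp_values) - 1, -1, -1):
--         ts_value = timestamp_values[idx]
--         if all(abs(ts_value - timestamp_values[prev_idx]) >= min_gap_ns for prev_idx in selected):
--             selected.append(idx)
--             if len(selected) == k:
--                 break
--
--     if len(selected) < k: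
--         seen = set(selected)
--         for idx in range(len(timestamp_values) - 1, -1, -1):
--             if idx in seen:
--                 continue
--             selected.append(idx)
--             if len(selected) == k:
--                 break
--
--     selected.sort(key=lambda idx: timestamp_values[idx])
--     return selected
-- ===== SOURCE B (Python) =====
-- def _bisect_left(a, x):
--     # CPython's bisect.bisect_left (hand-written: module imports must stay those of A)
--     lo, hi = 0, len(a)
--     while lo < hi:
--         mid = (lo + hi) // 2
--         if a[mid] < x:
--             lo = mid + 1
--         else:
--             hi = mid
--     return lo
--
--
-- def _bisect_right(a, x):
--     # CPython's bisect.bisect_right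
--     lo, hi = 0, len(a)
--     while lo < hi:
--         mid = (lo + hi) // 2
--         if x < a[mid]:
--             hi = mid
--         else:
--             lo = mid + 1
--     return lo
--
--
-- def _select_recent_min_overlap_indices(
--     timestamp_values: list[int],
--     k: int,
--     min_gap_ns: int,
-- ) -> list[int]:
--     if k <= 0 or not timestamp_values:
--         return []
--
--     selected: list[int] = []
--     sel_ts: list[int] = []  # timestamps of selected indices, kept sorted
--     for idx in range(len(timestamp_values) - 1, -1, -1):
--         x = timestamp_values[idx]
--         i = _bisect_left(sel_ts, x)
--         # only the nearest sorted neighbours can violate the gap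
--         if (i == 0 or x - sel_ts[i - 1] >= min_gap_ns) and (
--             i == len(sel_ts) or sel_ts[i] - x >= min_gap_ns
--         ):
--             selected.append(idx)
--             sel_ts.insert(_bisect_right(sel_ts, x), x)
--             if len(selected) == k:
--                 break
--
--     if len(selected) < k:
--         seen = set(selected)
--         need = k - len(selected)
--         filler = [idx for idx in range(len(timestamp_values) - 1, -1, -1) if idx not in seen]
--         selected.extend(filler[:need])
--
--     selected.sort(key=lambda idx: timestamp_values[idx])
--     return selected
-- ===== Notes on version B (the rewrite author's own statement) =====
-- stated objective: faster
-- what changed: B keeps the selected timestamps in a sorted list and replaces A's full scan per candidate by a binary-searched nearest-neighbour gap check (hand-written CPython bisect, since A imports no modules), and replaces A's break-on-k fill loop by a filter comprehension sliced to the needed count.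
import Mathlib
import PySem

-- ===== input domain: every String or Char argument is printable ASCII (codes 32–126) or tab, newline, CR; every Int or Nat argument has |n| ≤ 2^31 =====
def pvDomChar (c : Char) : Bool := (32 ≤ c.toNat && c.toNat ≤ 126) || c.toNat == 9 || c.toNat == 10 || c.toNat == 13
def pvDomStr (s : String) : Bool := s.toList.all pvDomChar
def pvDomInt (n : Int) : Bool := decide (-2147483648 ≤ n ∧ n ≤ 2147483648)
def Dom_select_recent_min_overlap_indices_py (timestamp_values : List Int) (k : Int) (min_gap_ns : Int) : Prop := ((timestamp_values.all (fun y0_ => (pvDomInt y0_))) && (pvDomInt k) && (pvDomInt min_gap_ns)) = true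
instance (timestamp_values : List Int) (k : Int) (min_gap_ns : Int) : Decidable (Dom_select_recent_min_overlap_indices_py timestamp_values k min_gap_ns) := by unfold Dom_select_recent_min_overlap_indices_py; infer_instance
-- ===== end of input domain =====

-- B replaces A's full scan of the selected timestamps by a binary-searched nearest-neighbour
-- check on a sorted list of the selected timestamps (objective: faster).

-- ===== PORT A =====
-- the 'all(...)' scan over selected, then append, with break when len == k
def selLoopA (ts : List Int) (g k : Int) : List Int → List Int → List Int
  | [], sel => sel
  | idx :: rest, sel =>
    -- ts[idx]: idx comes from range(len(ts)-1, -1, -1), always in range, so the default is never used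
    let x := PySem.List.pyGetD ts idx 0
    if sel.all (fun p => decide (g ≤ |x - PySem.List.pyGetD ts p 0|)) then
      let sel' := sel ++ [idx]
      if (sel'.length : Int) = k then sel' else selLoopA ts g k rest sel'
    else selLoopA ts g k rest sel

-- the fill loop: skip indices already in 'seen', append, break when len == k
def fillLoopA (k : Int) (seen : PySem.Set Int) : List Int → List Int → List Int
  | [], sel => sel
  | idx :: rest, sel =>
    if PySem.Set.contains seen idx then fillLoopA k seen rest sel
    else
      let sel' := sel ++ [idx]
      if (sel'.length : Int) = k then sel' else fillLoopA k seen rest sel'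

def select_recent_min_overlap_indices_py (timestamp_values : List Int) (k : Int) (min_gap_ns : Int) : List Int :=
  if k ≤ 0 ∨ timestamp_values = [] then []
  else
    let idxs := PySem.List.pyRange ((timestamp_values.length : Int) - 1) (-1) (-1)
    let sel := selLoopA timestamp_values min_gap_ns k idxs []
    let sel2 := if (sel.length : Int) < k then fillLoopA k (PySem.Set.ofList sel) idxs sel else sel
    PySem.List.sorted sel2 (fun idx => PySem.List.pyGetD timestamp_values idx 0)

-- ===== PORT B =====
-- Source B's hand-written _bisect_left/_bisect_right are character-for-character CPython's
-- bisect.bisect_left/bisect_right, ported as the corresponding PySem primitives.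
-- selection loop carrying (selected, sel_ts) with sel_ts kept sorted
def selLoopB (ts : List Int) (g k : Int) : List Int → List Int → List Int → List Int
  | [], sel, _ => sel
  | idx :: rest, sel, sts =>
    let x := PySem.List.pyGetD ts idx 0
    let i := PySem.List.bisectLeft sts x
    -- sel_ts[i-1] / sel_ts[i]: each access is guarded (i ≠ 0 resp. i ≠ len), so getD's default is never used
    if (decide (i = 0) || decide (g ≤ x - sts.getD (i - 1) 0)) &&
       (decide (i = sts.length) || decide (g ≤ sts.getD i 0 - x)) then
      let sel' := sel ++ [idx]
      let sts' := PySem.List.insert sts ((PySem.List.bisectRight sts x : Nat) : Int) x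
      if (sel'.length : Int) = k then sel' else selLoopB ts g k rest sel' sts'
    else selLoopB ts g k rest sel sts

def select_recent_min_overlap_indices_py_alt (timestamp_values : List Int) (k : Int) (min_gap_ns : Int) : List Int :=
  if k ≤ 0 ∨ timestamp_values = [] then []
  else
    let idxs := PySem.List.pyRange ((timestamp_values.length : Int) - 1) (-1) (-1)
    let sel := selLoopB timestamp_values min_gap_ns k idxs [] []
    -- fill phase: filter out the already selected indices and take the first (k - len) of the rest
    let sel2 := if (sel.length : Int) < k then
        let seen := PySem.Set.ofList sel
        let filler := idxs.filter (fun idx => !(PySem.Set.contains seen idx))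
        sel ++ PySem.List.slice filler none (some (k - (sel.length : Int)))
      else sel
    PySem.List.sorted sel2 (fun idx => PySem.List.pyGetD timestamp_values idx 0)

-- ===== PRECONDITION & SPEC =====
def Spec_select_recent_min_overlap_indices_py (timestamp_values : List Int) (k : Int) (min_gap_ns : Int) (out : List Int) : Prop := out = select_recent_min_overlap_indices_py_alt timestamp_values k min_gap_ns
instance (timestamp_values : List Int) (k : Int) (min_gap_ns : Int) (out : List Int) : Decidable (Spec_select_recent_min_overlap_indices_py timestamp_values k min_gap_ns out) := by unfold Spec_select_recent_min_overlap_indices_py; infer_instance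

-- ===== CLAIM =====
def Claim_equal_select_recent_min_overlap_indices_py : Prop := ∀ (timestamp_values : List Int) (k : Int) (min_gap_ns : Int), Dom_select_recent_min_overlap_indices_py timestamp_values k min_gap_ns → Spec_select_recent_min_overlap_indices_py timestamp_values k min_gap_ns (select_recent_min_overlap_indices_py timestamp_values k min_gap_ns)

-- ===== LEMMAS AND PROOFS =====

-- B's neighbour test on a sorted list equals A's full scan over the same multiset of timestamps
theorem checkB_eq_all (sts : List Int) (x g : Int) (h : sts.Pairwise (· ≤ ·)) :
    ((decide (PySem.List.bisectLeft sts x = 0) ||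
        decide (g ≤ x - sts.getD (PySem.List.bisectLeft sts x - 1) 0)) &&
      (decide (PySem.List.bisectLeft sts x = sts.length) ||
        decide (g ≤ sts.getD (PySem.List.bisectLeft sts x) 0 - x)))
    = sts.all (fun t => decide (g ≤ |x - t|)) := by
  obtain ⟨hle, hlt, hge⟩ := PySem.List.bisectLeft_spec sts x h
  set i := PySem.List.bisectLeft sts x with hi
  have hlt' : ∀ j, j < i → ∀ hj : j < sts.length, sts.getD j 0 < x := by
    intro j h1 h2; rw [List.getD_eq_getElem _ _ h2]; exact hlt j h2 h1
  have hge' : ∀ j, i ≤ j → ∀ hj : j < sts.length, x ≤ sts.getD j 0 := by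
    intro j h1 h2; rw [List.getD_eq_getElem _ _ h2]; exact hge j h2 h1
  have hmono : ∀ p q, p ≤ q → q < sts.length → sts.getD p 0 ≤ sts.getD q 0 := by
    intro p q hpq hq
    rcases Nat.eq_or_lt_of_le hpq with rfl | hlt2
    · exact le_refl _
    rw [List.getD_eq_getElem _ _ hq, List.getD_eq_getElem _ _ (by omega)]
    exact List.pairwise_iff_getElem.mp h p q (by omega) hq hlt2
  rw [Bool.eq_iff_iff]
  simp only [Bool.and_eq_true, Bool.or_eq_true, decide_eq_true_eq, List.all_eq_true]
  constructor
  · rintro ⟨h1, h2⟩ t ht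
    obtain ⟨j, hj, rfl⟩ := List.mem_iff_getElem.mp ht
    rw [← List.getD_eq_getElem sts 0 hj]
    by_cases hji : j < i
    · rcases h1 with h1 | h1
      · omega
      · have hm := hmono j (i - 1) (by omega) (by omega)
        have hx := hlt' j hji hj
        have habs : |x - sts.getD j 0| = x - sts.getD j 0 := abs_of_pos (by omega)
        omega
    · rcases h2 with h2 | h2
      · omega
      · have hm := hmono i j (by omega) hj
        have hx := hge' j (by omega) hj
        have habs : |x - sts.getD j 0| = sts.getD j 0 - x := by
          rw [abs_sub_comm]; exact abs_of_nonneg (by omega)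
        omega
  · intro hall
    constructor
    · by_cases h0 : i = 0
      · exact Or.inl h0
      · right
        have hidx : i - 1 < sts.length := by omega
        have hx := hlt' (i - 1) (by omega) hidx
        have hmem := hall _ (List.getElem_mem hidx)
        rw [← List.getD_eq_getElem sts 0 hidx] at hmem
        have habs : |x - sts.getD (i - 1) 0| = x - sts.getD (i - 1) 0 := abs_of_pos (by omega)
        omega
    · by_cases hn : i = sts.length
      · exact Or.inl hn
      · right
        have hidx : i < sts.length := by omega
        have hx := hge' i (by omega) hidx
        have hmem := hall _ (List.getElem_mem hidx)
        rw [← List.getD_eq_getElem sts 0 hidx] at hmem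
        have habs : |x - sts.getD i 0| = sts.getD i 0 - x := by
          rw [abs_sub_comm]; exact abs_of_nonneg (by omega)
        omega

-- insertion at bisectRight keeps the list sorted and adds x to the multiset
theorem insort_sorted (sts : List Int) (x : Int) (h : sts.Pairwise (· ≤ ·)) :
    (PySem.List.insert sts ((PySem.List.bisectRight sts x : Nat) : Int) x).Pairwise (· ≤ ·) ∧
    (PySem.List.insert sts ((PySem.List.bisectRight sts x : Nat) : Int) x).Perm (x :: sts) := by
  obtain ⟨hle, hlt, hgt⟩ := PySem.List.bisectRight_spec sts x h
  rw [PySem.List.insert_natCast sts _ x hle]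
  constructor
  · rw [List.pairwise_append]
    refine ⟨h.sublist (List.take_sublist _ _), ?_, ?_⟩
    · rw [List.pairwise_cons]
      refine ⟨?_, h.sublist (List.drop_sublist _ _)⟩
      intro b hb
      obtain ⟨j, hj, rfl⟩ := List.mem_iff_getElem.mp hb
      rw [List.length_drop] at hj
      rw [List.getElem_drop]
      exact le_of_lt (hgt _ (by omega) (by omega))
    · intro a ha b hb
      obtain ⟨j, hj, rfl⟩ := List.mem_iff_getElem.mp ha
      rw [List.getElem_take] at *
      have hax : sts[j]'(by simp at hj; omega) ≤ x := hlt _ _ (by simp at hj; omega)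
      rcases List.mem_cons.mp hb with rfl | hb'
      · exact hax
      · obtain ⟨j', hj', rfl⟩ := List.mem_iff_getElem.mp hb'
        rw [List.length_drop] at hj'
        rw [List.getElem_drop]
        exact hax.trans (le_of_lt (hgt _ (by omega) (by omega)))
  · exact (List.perm_middle).trans (by rw [List.take_append_drop])

theorem selLoop_eq (ts : List Int) (g k : Int) (idxs : List Int) :
    ∀ (sel sts : List Int), sts.Pairwise (· ≤ ·) →
      sts.Perm (sel.map (fun p => PySem.List.pyGetD ts p 0)) →
      selLoopA ts g k idxs sel = selLoopB ts g k idxs sel sts := by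
  induction idxs with
  | nil => intro sel sts _ _; rfl
  | cons idx rest ih =>
      intro sel sts hsort hperm
      simp only [selLoopA, selLoopB]
      rw [checkB_eq_all sts (PySem.List.pyGetD ts idx 0) g hsort]
      have hall : sts.all (fun t => decide (g ≤ |PySem.List.pyGetD ts idx 0 - t|))
          = sel.all (fun p => decide (g ≤ |PySem.List.pyGetD ts idx 0 - PySem.List.pyGetD ts p 0|)) := by
        rw [hperm.all_eq, List.all_map]
        rfl
      rw [hall]
      split
      · split
        · rfl
        · refine ih (sel ++ [idx]) _ (insort_sorted sts (PySem.List.pyGetD ts idx 0) hsort).1 ?_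
          refine ((insort_sorted sts (PySem.List.pyGetD ts idx 0) hsort).2.trans ?_)
          simp only [List.map_append, List.map_cons, List.map_nil]
          exact ((hperm.cons _).trans (List.perm_append_singleton _ _).symm)
      · exact ih sel sts hsort hperm

-- A's break-on-k fill loop is 'filter then take (k - len)'
theorem fillLoop_eq (k : Int) (seen : PySem.Set Int) (idxs : List Int) :
    ∀ sel : List Int, (sel.length : Int) < k →
      fillLoopA k seen idxs sel
        = sel ++ (idxs.filter (fun idx => !(PySem.Set.contains seen idx))).take (k - (sel.length : Int)).toNat := by
  induction idxs with
  | nil => intro sel _; simp [fillLoopA]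
  | cons i rest ih =>
      intro sel hlen
      simp only [fillLoopA, List.filter_cons]
      by_cases hc : PySem.Set.contains seen i
      · simp only [hc, if_true, Bool.not_true, Bool.false_eq_true, if_false]
        exact ih sel hlen
      · simp only [hc, Bool.not_false, if_true, Bool.false_eq_true, if_false]
        have htake : (k - (sel.length : Int)).toNat = ((k - (sel.length : Int)).toNat - 1) + 1 := by omega
        rw [htake, List.take_succ_cons]
        by_cases hk : ((sel ++ [i]).length : Int) = k
        · simp only [if_pos hk]
          have h0 : (k - (sel.length : Int)).toNat - 1 = 0 := by simp at hk; omega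
          rw [h0, List.take_zero]
        · simp only [if_neg hk]
          rw [ih (sel ++ [i]) (by simp at hk ⊢; omega)]
          have : (k - (((sel ++ [i]).length : Nat) : Int)).toNat = (k - (sel.length : Int)).toNat - 1 := by
            simp; omega
          rw [this, List.append_assoc, List.singleton_append]

-- ===== VERDICT =====
theorem select_recent_min_overlap_indices_py_spec : Claim_equal_select_recent_min_overlap_indices_py := by
  intro ts k g _
  unfold Spec_select_recent_min_overlap_indices_py
  unfold select_recent_min_overlap_indices_py select_recent_min_overlap_indices_py_alt
  by_cases h : k ≤ 0 ∨ ts = []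
  · simp [h]
  · simp only [if_neg h]
    rw [selLoop_eq ts g k _ [] [] List.Pairwise.nil (by simp)]
    set sel := selLoopB ts g k (PySem.List.pyRange ((ts.length : Int) - 1) (-1) (-1)) [] [] with hsel
    by_cases hlen : (sel.length : Int) < k
    · rw [if_pos hlen, if_pos hlen,
        fillLoop_eq k (PySem.Set.ofList sel) _ sel hlen,
        PySem.List.slice_to _ (by omega)]
    · rw [if_neg hlen, if_neg hlen]
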